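-- pv_equiv track=rewrite | github.com/Julesc013/dominium | tools/xstack/sessionx/net_handshake.py | _first_registry_mismatch
-- ===== SOURCE A (Python) =====
-- from typing import Dict, List, Tuple
--
-- def _first_registry_mismatch(expected: dict, actual: dict) -> Tuple[str, str, str]:
--     expected_rows = dict(expected or {})
--     actual_rows = dict(actual or {})
--     for key in sorted(set(expected_rows.keys()) | set(actual_rows.keys())):
--         left = str(expected_rows.get(key, "")).strip()
--         right = str(actual_rows.get(key, "")).strip()
--         if left != right:
--             return str(key), left, right
--     return "", "", ""
-- ===== SOURCE B (Python) =====
-- from typing import Tuple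
--
-- def _first_registry_mismatch(expected: dict, actual: dict) -> Tuple[str, str, str]:
--     left_rows = {k: str(v).strip() for k, v in dict(expected or {}).items()}
--     right_rows = {k: str(v).strip() for k, v in dict(actual or {}).items()}
--     bad = [k for k in left_rows.keys() | right_rows.keys()
--            if left_rows.get(k, "") != right_rows.get(k, "")]
--     if not bad:
--         return "", "", ""
--     key = min(bad)
--     return str(key), left_rows.get(key, ""), right_rows.get(key, "")
-- ===== Notes on version B (the rewrite author's own statement) =====
-- stated objective: alternative
-- what changed: Instead of scanning the sorted key union for the first mismatch, B builds stripped-value dicts once, collects the mismatching keys by a filter over the unsorted key union, and returns the minimum of that list.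
import Mathlib
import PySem

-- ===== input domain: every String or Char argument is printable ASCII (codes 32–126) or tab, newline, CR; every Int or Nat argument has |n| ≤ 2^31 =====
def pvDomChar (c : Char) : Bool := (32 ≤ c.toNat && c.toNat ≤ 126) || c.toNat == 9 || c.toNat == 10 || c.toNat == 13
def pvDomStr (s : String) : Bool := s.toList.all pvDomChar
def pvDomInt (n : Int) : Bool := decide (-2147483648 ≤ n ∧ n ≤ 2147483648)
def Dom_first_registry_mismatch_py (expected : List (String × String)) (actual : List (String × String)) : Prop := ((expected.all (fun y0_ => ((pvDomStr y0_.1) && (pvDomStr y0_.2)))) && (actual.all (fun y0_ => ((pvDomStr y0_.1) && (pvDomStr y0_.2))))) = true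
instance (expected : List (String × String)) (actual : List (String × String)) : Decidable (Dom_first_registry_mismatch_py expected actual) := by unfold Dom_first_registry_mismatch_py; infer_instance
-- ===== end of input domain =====

-- B replaces A's sorted-union scan for the first mismatch by: strip all values up front,
-- filter the unsorted key union for mismatches, and take the minimum key (alternative algorithm, same result).


-- ===== PORT A =====
-- A's loop: 'for key in sorted(...): left = ..., right = ...; if left != right: return key, left, right'
def pvLoopA (e a : PySem.Dict String String) : List String → String × String × String
  | [] => ("", "", "")
  | k :: ks =>
    let left := PySem.Str.strip (e.getD k "")
    let right := PySem.Str.strip (a.getD k "")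
    if left != right then (k, left, right) else pvLoopA e a ks

def first_registry_mismatch_py (expected : List (String × String)) (actual : List (String × String)) : String × String × String :=
  let expectedRows : PySem.Dict String String := PySem.Dict.mk expected
  let actualRows : PySem.Dict String String := PySem.Dict.mk actual
  pvLoopA expectedRows actualRows
    (PySem.List.sorted ((PySem.Set.ofList expectedRows.keys).union (PySem.Set.ofList actualRows.keys)) id)

-- ===== PORT B =====
-- '{k: str(v).strip() for k, v in dict(d).items()}' (a dict's items have distinct keys, so rebuilding is exact)
def pvStripDict (d : List (String × String)) : PySem.Dict String String :=
  PySem.Dict.mk (((PySem.Dict.mk d).items).map (fun kv => (kv.1, PySem.Str.strip kv.2)))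

def first_registry_mismatch_py_alt (expected : List (String × String)) (actual : List (String × String)) : String × String × String :=
  let leftRows := pvStripDict expected
  let rightRows := pvStripDict actual
  let bad := ((PySem.Set.ofList leftRows.keys).union (PySem.Set.ofList rightRows.keys)).filter
      (fun k => leftRows.getD k "" != rightRows.getD k "")
  match PySem.List.min? bad (fun k => k) with
  | none => ("", "", "")
  | some key => (key, leftRows.getD key "", rightRows.getD key "")

-- ===== PRECONDITION & SPEC =====
def Spec_first_registry_mismatch_py (expected : List (String × String)) (actual : List (String × String)) (out : String × String × String) : Prop := out = first_registry_mismatch_py_alt expected actual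
instance (expected : List (String × String)) (actual : List (String × String)) (out : String × String × String) : Decidable (Spec_first_registry_mismatch_py expected actual out) := by unfold Spec_first_registry_mismatch_py; infer_instance

-- ===== CLAIM (what is proved, stated in full; the proofs are below) =====
def Claim_equal_first_registry_mismatch_py : Prop := ∀ (expected : List (String × String)) (actual : List (String × String)), Dom_first_registry_mismatch_py expected actual → Spec_first_registry_mismatch_py expected actual (first_registry_mismatch_py expected actual)

-- ===== LEMMAS AND PROOFS =====

-- stripping the values does not change the key list
theorem keys_pvStripDict (d : List (String × String)) :
    (pvStripDict d).keys = (PySem.Dict.mk d).keys := by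
  simp [pvStripDict, PySem.Dict.keys]

-- lookup in the stripped dict = strip of the lookup (strip "" = "")
theorem get?_mk_map_strip (l : List (String × String)) (k : String) :
    (PySem.Dict.mk (l.map (fun kv => (kv.1, PySem.Str.strip kv.2)))).get? k
      = ((PySem.Dict.mk l).get? k).map PySem.Str.strip := by
  induction l with
  | nil => rfl
  | cons p t ih =>
    obtain ⟨pk, pv⟩ := p
    by_cases h : pk == k <;> simp [PySem.Dict.get?_mk_cons, h, ih]

theorem getD_pvStripDict (d : List (String × String)) (k : String) :
    (pvStripDict d).getD k "" = PySem.Str.strip ((PySem.Dict.mk d).getD k "") := by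
  rw [pvStripDict, PySem.Dict.getD_eq_get?_getD, PySem.Dict.getD_eq_get?_getD,
    get?_mk_map_strip]
  cases (PySem.Dict.mk d).get? k <;> simp; decide

-- A's scan returns the head of the mismatch-filtered list
theorem pvLoopA_eq_filter (e a : PySem.Dict String String) (ks : List String) :
    pvLoopA e a ks =
      match ks.filter (fun k => PySem.Str.strip (e.getD k "") != PySem.Str.strip (a.getD k "")) with
      | [] => ("", "", "")
      | k :: _ => (k, PySem.Str.strip (e.getD k ""), PySem.Str.strip (a.getD k "")) := by
  induction ks with
  | nil => rfl
  | cons k t ih =>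
    by_cases h : (PySem.Str.strip (e.getD k "") != PySem.Str.strip (a.getD k "")) = true <;>
      simp [pvLoopA, h, ih]

-- min? (with the identity key) of any permutation of a strictly sorted list is its head
theorem min?_of_perm_sorted (l ls : List String) (h : ls.Perm l)
    (hs : List.Pairwise (· < ·) ls) :
    PySem.List.min? l (fun k => k) = ls.head? := by
  cases ls with
  | nil =>
    have : l = [] := h.symm.eq_nil
    subst this
    simp [PySem.List.min?_eq_none_iff]
  | cons m t =>
    have hl : l ≠ [] := by
      intro hnil; subst hnil; exact absurd h (by simp)
    obtain ⟨m0, hm0⟩ : ∃ m0, PySem.List.min? l (fun k => k) = some m0 := by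
      cases hmin : PySem.List.min? l (fun k => k) with
      | none => exact absurd ((PySem.List.min?_eq_none_iff l (fun k => k)).mp hmin) hl
      | some x => exact ⟨x, rfl⟩
    have hmem : m0 ∈ l := PySem.List.min?_mem hm0
    have hmin : ∀ y ∈ l, m0 ≤ y := PySem.List.min?_isMin hm0
    have hmem' : m0 ∈ m :: t := h.mem_iff.mpr hmem
    have hmle : m0 ≤ m := hmin m (h.mem_iff.mp (by simp))
    have hlt : ∀ y ∈ t, m < y := (List.pairwise_cons.mp hs).1
    rcases List.mem_cons.mp hmem' with h1 | h1
    · simp [hm0, h1]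
    · exact absurd (hlt m0 h1) (not_lt.mpr hmle)

-- ===== VERDICT (by name: the statement is the Claim_ definition above) =====
theorem first_registry_mismatch_py_spec : Claim_equal_first_registry_mismatch_py := by
  intro expected actual _
  unfold Spec_first_registry_mismatch_py
  unfold first_registry_mismatch_py first_registry_mismatch_py_alt
  simp only [keys_pvStripDict]
  set E := PySem.Dict.mk expected
  set A := PySem.Dict.mk actual
  set U := (PySem.Set.ofList E.keys).union (PySem.Set.ofList A.keys) with hU
  have hrewrite :
      (U.filter (fun k => (pvStripDict expected).getD k "" != (pvStripDict actual).getD k ""))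
        = U.filter (fun k => PySem.Str.strip (E.getD k "") != PySem.Str.strip (A.getD k "")) := by
    apply List.filter_congr
    intro k _
    rw [getD_pvStripDict, getD_pvStripDict]
  rw [hrewrite, pvLoopA_eq_filter]
  -- the sorted filtered list is strictly increasing and a permutation of the unsorted filtered list
  have hnodupU : U.Nodup :=
    PySem.Set.nodup_union _ _ (PySem.Set.nodup_ofList _)
  have hperm : (PySem.List.sorted U id false).Perm U := PySem.List.sorted_perm U id false
  have hpair : List.Pairwise (· ≤ ·) (PySem.List.sorted U id false) := by
    simpa using PySem.List.sorted_pairwise U id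
  have hnodup : (PySem.List.sorted U id false).Nodup := hperm.nodup_iff.mpr hnodupU
  have hlt : List.Pairwise (· < ·) (PySem.List.sorted U id false) := by
    refine (hpair.and hnodup).imp ?_
    rintro a b ⟨h1, h2⟩
    exact lt_of_le_of_ne h1 h2
  set p : String → Bool := fun k => PySem.Str.strip (E.getD k "") != PySem.Str.strip (A.getD k "") with hp
  have hpermF : ((PySem.List.sorted U id false).filter p).Perm (U.filter p) := hperm.filter p
  have hltF : List.Pairwise (· < ·) ((PySem.List.sorted U id false).filter p) :=
    hlt.sublist List.filter_sublist
  have hmin := min?_of_perm_sorted (U.filter p) ((PySem.List.sorted U id false).filter p) hpermF hltF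
  cases hcase : (PySem.List.sorted U id false).filter p with
  | nil =>
    rw [hcase] at hmin
    simp only [List.head?_nil] at hmin
    simp [hmin]
  | cons m t =>
    rw [hcase] at hmin
    simp only [List.head?_cons] at hmin
    simp [hmin, getD_pvStripDict, E, A]
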